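-- pv_equiv track=rewrite | github.com/circlesgit/resources | ansible-1-devel/hacking/metadata-tool.py | seek_end_of_dict
-- ===== SOURCE A (Python) =====
-- class ParseError(Exception):
--     """Thrown when parsing a file fails"""
--     pass
--
-- def seek_end_of_dict(module_data, start_line, start_col, next_node_line, next_node_col):
--     """Look for the end of a dict in a set of lines
--
--     We know the starting position of the dict and we know the start of the
--     next code node but in between there may be multiple newlines and comments.
--     There may also be multiple python statements on the same line (separated
--     by semicolons)
--
--     Examples::
--         ANSIBLE_METADATA = {[..]}
--         DOCUMENTATION = [..]
--
--         ANSIBLE_METADATA = {[..]} # Optional comments with confusing junk => {}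
--         # Optional comments {}
--         DOCUMENTATION = [..]
--
--         ANSIBLE_METADATA = {
--             [..]
--             }
--         # Optional comments {}
--         DOCUMENTATION = [..]
--
--         ANSIBLE_METADATA = {[..]} ; DOCUMENTATION = [..]
--
--         ANSIBLE_METADATA = {}EOF
--     """
--     if next_node_line == None:
--         # The dict is the last statement in the file
--         snippet = module_data.splitlines()[start_line:]
--         next_node_col = 0
--         # Include the last line in the file
--         last_line_offset = 0
--     else:
--         # It's somewhere in the middle so we need to separate it from the rest
--         snippet = module_data.splitlines()[start_line:next_node_line]
--         # Do not include the last line because that's where the next node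
--         # starts
--         last_line_offset = 1
--
--     if next_node_col == 0:
--         # This handles all variants where there are only comments and blank
--         # lines between the dict and the next code node
--
--         # Step backwards through all the lines in the snippet
--         for line_idx, line in tuple(reversed(tuple(enumerate(snippet))))[last_line_offset:]:
--             end_col = None
--             # Step backwards through all the characters in the line
--             for col_idx, char in reversed(tuple(enumerate(c for c in line))):
--                 if char == '}' and end_col is None:
--                     # Potentially found the end of the dict
--                     end_col = col_idx
--
--                 elif char == '#' and end_col is not None:
--                     # The previous '}' was part of a comment.  Keep trying
--                     end_col = None
--
--             if end_col is not None:
--                 # Found the end!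
--                 end_line = start_line + line_idx
--                 break
--     else:
--         # Harder cases involving multiple statements on one line
--         # Good Ansible Module style doesn't do this so we're just going to
--         # treat this as an error for now:
--         raise ParseError('Multiple statements per line confuses the module metadata parser.')
--
--     return end_line, end_col
-- ===== SOURCE B (Python) =====
-- class ParseError(Exception):
--     """Thrown when parsing a file fails"""
--     pass
--
--
-- def _last_code_brace(line):
--     """Column of the last '}' that appears before any '#' in the line, else -1."""
--     end_col = -1
--     for col, char in enumerate(line):
--         if char == '#':
--             break
--         if char == '}':
--             end_col = col
--     return end_col
--
--
-- def seek_end_of_dict(module_data, start_line, start_col, next_node_line, next_node_col):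
--     if next_node_line is None:
--         snippet = module_data.splitlines()[start_line:]
--         next_node_col = 0
--         last_line_offset = 0
--     else:
--         snippet = module_data.splitlines()[start_line:next_node_line]
--         last_line_offset = 1
--     if next_node_col != 0:
--         raise ParseError('Multiple statements per line confuses the module metadata parser.')
--     # Walk the examined lines from the last one backwards; a never-found case
--     # leaves end_line unassigned and raises, exactly like the original.
--     for line_idx in range(len(snippet) - 1 - last_line_offset, -1, -1):
--         end_col = _last_code_brace(snippet[line_idx])
--         if end_col != -1:
--             end_line = start_line + line_idx
--             break
--     return end_line, end_col
-- ===== Notes on version B (the rewrite author's own statement) =====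
-- stated objective: simpler
-- what changed: Each line is now scanned once forward, stopping at the first '#' and remembering the last '}' seen, instead of A's backward reset-on-'#' state machine over a reversed enumerate; the examined lines are walked by a countdown index range instead of slicing a reversed enumerated tuple.
import Mathlib
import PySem

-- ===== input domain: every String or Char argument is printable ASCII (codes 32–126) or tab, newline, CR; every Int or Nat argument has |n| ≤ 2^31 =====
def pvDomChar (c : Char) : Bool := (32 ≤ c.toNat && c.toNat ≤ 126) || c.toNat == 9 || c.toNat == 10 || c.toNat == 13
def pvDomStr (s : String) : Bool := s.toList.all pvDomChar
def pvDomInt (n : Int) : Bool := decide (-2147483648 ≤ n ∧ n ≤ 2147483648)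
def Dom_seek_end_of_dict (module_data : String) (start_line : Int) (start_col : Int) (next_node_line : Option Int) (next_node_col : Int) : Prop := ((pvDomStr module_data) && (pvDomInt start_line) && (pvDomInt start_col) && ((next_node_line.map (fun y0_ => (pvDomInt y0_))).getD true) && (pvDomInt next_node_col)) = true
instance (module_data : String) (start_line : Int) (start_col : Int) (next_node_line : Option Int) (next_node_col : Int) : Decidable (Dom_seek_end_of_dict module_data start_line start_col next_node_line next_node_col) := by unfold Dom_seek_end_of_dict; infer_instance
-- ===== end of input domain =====

-- B replaces A's backward per-character scan (a reset-on-'#' state machine over reversed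
-- enumerate) by a single forward scan per line that stops at '#' and keeps the last '}',
-- and walks the examined lines by a countdown index range instead of a sliced reversed
-- enumerate tuple.  Objective: simpler.  Where the Python raises (ParseError when
-- next_node_col ≠ 0 on a mid-file dict, UnboundLocalError when no '}' is found) both
-- ports return the dummy (0, 0); Pre_ excludes exactly those inputs.

-- ===== PORT A =====
-- inner loop body: `if char == '}' and end_col is None … elif char == '#' and end_col is not None …`
def pvAStep (state : Option Int) (p : Int × Char) : Option Int :=
  if p.2 = '}' ∧ state = none then some p.1
  else if p.2 = '#' ∧ state ≠ none then none
  else state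

-- `for col_idx, char in reversed(tuple(enumerate(c for c in line))): …`
def pvAScanLine (line : String) : Option Int :=
  ((PySem.List.enumerate line.toList).reverse).foldl pvAStep none

-- `for line_idx, line in …:` with the break / fall-off-the-end (UnboundLocalError → dummy (0,0))
def pvALoop (start_line : Int) : List (Int × String) → Int × Int
  | [] => (0, 0)  -- Python raises UnboundLocalError here; outside Pre_
  | (line_idx, line) :: rest =>
    match pvAScanLine line with
    | some end_col => (start_line + line_idx, end_col)
    | none => pvALoop start_line rest

def seek_end_of_dict (module_data : String) (start_line : Int) (start_col : Int) (next_node_line : Option Int) (next_node_col : Int) : Int × Int :=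
  let lines := PySem.Str.splitlines module_data
  -- (snippet, next_node_col after the branch, last_line_offset)
  let s : List String × Int × Int :=
    match next_node_line with
    | none => (PySem.List.slice lines (some start_line) none, 0, 0)
    | some nl => (PySem.List.slice lines (some start_line) (some nl), next_node_col, 1)
  if s.2.1 = 0 then
    pvALoop start_line (PySem.List.slice ((PySem.List.enumerate s.1).reverse) (some s.2.2) none)
  else (0, 0)  -- Python raises ParseError here; outside Pre_

-- ===== PORT B =====
-- `_last_code_brace`: forward scan, break at '#', remember the last '}' column
def pvBScan : List Char → Int → Int → Int
  | [], _, end_col => end_col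
  | c :: rest, col, end_col =>
    if c = '#' then end_col
    else pvBScan rest (col + 1) (if c = '}' then col else end_col)

-- `for line_idx in range(len(snippet) - 1 - last_line_offset, -1, -1): …`
-- snippet[line_idx] is always in range here, so pyGetD is exact for the subscript
def pvBLoop (start_line : Int) (snippet : List String) : List Int → Int × Int
  | [] => (0, 0)  -- Python raises UnboundLocalError here; outside Pre_
  | i :: rest =>
    let end_col := pvBScan (PySem.List.pyGetD snippet i "").toList 0 (-1)
    if end_col ≠ -1 then (start_line + i, end_col)
    else pvBLoop start_line snippet rest

def seek_end_of_dict_alt (module_data : String) (start_line : Int) (start_col : Int) (next_node_line : Option Int) (next_node_col : Int) : Int × Int :=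
  let lines := PySem.Str.splitlines module_data
  let s : List String × Int × Int :=
    match next_node_line with
    | none => (PySem.List.slice lines (some start_line) none, 0, 0)
    | some nl => (PySem.List.slice lines (some start_line) (some nl), next_node_col, 1)
  if s.2.1 ≠ 0 then (0, 0)  -- Python raises ParseError here; outside Pre_
  else pvBLoop start_line s.1 (PySem.List.pyRange ((s.1.length : Int) - 1 - s.2.2) (-1) (-1))

-- ===== PRECONDITION & SPEC =====
-- Pre_ excludes exactly the inputs on which Python A raises: ParseError (a mid-file dict
-- with next_node_col ≠ 0) and UnboundLocalError (no examined line has a '}' before its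
-- first '#').  On every other input A returns normally.
def Pre_seek_end_of_dict (module_data : String) (start_line : Int) (start_col : Int) (next_node_line : Option Int) (next_node_col : Int) : Prop :=
  let lines := PySem.Str.splitlines module_data
  let snippet : List String :=
    match next_node_line with
    | none => PySem.List.slice lines (some start_line) none
    | some nl => PySem.List.slice lines (some start_line) (some nl)
  let off : Nat := match next_node_line with | none => 0 | some _ => 1
  (next_node_line = none ∨ next_node_col = 0) ∧
  (snippet.take (snippet.length - off)).any
    (fun l => (l.toList.takeWhile (fun c => c ≠ '#')).contains '}') = true
instance (module_data : String) (start_line : Int) (start_col : Int) (next_node_line : Option Int) (next_node_col : Int) : Decidable (Pre_seek_end_of_dict module_data start_line start_col next_node_line next_node_col) := by unfold Pre_seek_end_of_dict; infer_instance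

def pvWitness_seek_end_of_dict : String × Int × Int × Option Int × Int := ("A = {}", 0, 0, none, 0)

def Spec_seek_end_of_dict (module_data : String) (start_line : Int) (start_col : Int) (next_node_line : Option Int) (next_node_col : Int) (out : Int × Int) : Prop := out = seek_end_of_dict_alt module_data start_line start_col next_node_line next_node_col
instance (module_data : String) (start_line : Int) (start_col : Int) (next_node_line : Option Int) (next_node_col : Int) (out : Int × Int) : Decidable (Spec_seek_end_of_dict module_data start_line start_col next_node_line next_node_col out) := by unfold Spec_seek_end_of_dict; infer_instance

-- ===== CLAIM (what is proved, stated in full; the proofs are below) =====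
def Claim_equal_seek_end_of_dict : Prop := ∀ (module_data : String) (start_line : Int) (start_col : Int) (next_node_line : Option Int) (next_node_col : Int), Dom_seek_end_of_dict module_data start_line start_col next_node_line next_node_col → Pre_seek_end_of_dict module_data start_line start_col next_node_line next_node_col → Spec_seek_end_of_dict module_data start_line start_col next_node_line next_node_col (seek_end_of_dict module_data start_line start_col next_node_line next_node_col)

-- ===== LEMMAS AND PROOFS =====

-- pvBScan's result is its accumulator or a column ≥ 0
lemma pvBScan_cases (cs : List Char) (col a : Int) (hcol : 0 ≤ col) :
    pvBScan cs col a = a ∨ 0 ≤ pvBScan cs col a := by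
  induction cs generalizing col a with
  | nil => left; rfl
  | cons c rest ih =>
    by_cases h : c = '#'
    · left; simp [pvBScan, h]
    · by_cases hb : c = '}'
      · simp only [pvBScan]
        rw [if_neg h, if_pos hb]
        rcases ih (col + 1) col (by omega) with h' | h'
        · right; rw [h']; exact hcol
        · right; exact h'
      · simp only [pvBScan]
        rw [if_neg h, if_neg hb]
        exact ih (col + 1) a (by omega)

-- the accumulator only matters when no '}' is found
lemma pvBScan_acc (cs : List Char) (col a : Int) (hcol : 0 ≤ col) :
    pvBScan cs col a = if pvBScan cs col (-1) = -1 then a else pvBScan cs col (-1) := by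
  induction cs generalizing col a with
  | nil => simp [pvBScan]
  | cons c rest ih =>
    by_cases h : c = '#'
    · simp [pvBScan, h]
    · by_cases hb : c = '}'
      · simp only [pvBScan]
        rw [if_neg h, if_pos hb, if_neg h, if_pos hb]
        have hne : pvBScan rest (col + 1) col ≠ -1 := by
          rcases pvBScan_cases rest (col + 1) col (by omega) with h' | h' <;> omega
        rw [if_neg hne]
      · simp only [pvBScan]
        rw [if_neg h, if_neg hb, if_neg h, if_neg hb]
        exact ih (col + 1) a (by omega)

-- INNER EQUIVALENCE: A's backward reset-on-'#' scan computes the last '}' before the first '#'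
lemma inner_eq (cs : List Char) (col : Int) (hcol : 0 ≤ col) :
    ((PySem.List.enumerate cs col).reverse).foldl pvAStep none =
      (if pvBScan cs col (-1) = -1 then none else some (pvBScan cs col (-1))) := by
  induction cs generalizing col with
  | nil => simp [PySem.List.enumerate_nil, pvBScan]
  | cons c rest ih =>
    rw [PySem.List.enumerate_cons, List.reverse_cons, List.foldl_append]
    have ihr := ih (col + 1) (by omega)
    by_cases h : c = '#'
    · by_cases hr : pvBScan rest (col + 1) (-1) = -1 <;>
        simp [ihr, hr, pvAStep, pvBScan, h]
    · by_cases hb : c = '}'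
      · have hacc := pvBScan_acc rest (col + 1) col (by omega)
        have hBs : pvBScan (c :: rest) col (-1) = pvBScan rest (col + 1) col := by
          simp only [pvBScan]; rw [if_neg h, if_pos hb]
        by_cases hr : pvBScan rest (col + 1) (-1) = -1
        · rw [hBs, hacc, if_pos hr, if_neg (by omega : ¬ col = -1)]
          simp [ihr, hr, pvAStep, hb]
        · rw [hBs, hacc, if_neg hr, if_neg hr]
          simp [ihr, hr, pvAStep, hb]
      · have hBs : pvBScan (c :: rest) col (-1) = pvBScan rest (col + 1) (-1) := by
          simp only [pvBScan]; rw [if_neg h, if_neg hb]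
        rw [hBs, ← ihr]
        simp [pvAStep, h, hb]

-- OUTER EQUIVALENCE: the two line loops agree on matching line lists
lemma loop_eq (snippet : List String) (start_line : Int) (idxs : List Int) :
    pvALoop start_line (idxs.map (fun i => (i, PySem.List.pyGetD snippet i ""))) =
      pvBLoop start_line snippet idxs := by
  induction idxs with
  | nil => rfl
  | cons i rest ih =>
    simp only [List.map_cons, pvALoop, pvBLoop, pvAScanLine,
      inner_eq (PySem.List.pyGetD snippet i "").toList 0 (by omega)]
    by_cases hr : pvBScan (PySem.List.pyGetD snippet i "").toList 0 (-1) = -1 <;>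
      simp [hr, ih]

-- A's sliced reversed enumerate IS B's countdown index range, paired with its lines
lemma lines_eq (xs : List String) (m : Nat) :
    ((PySem.List.enumerate xs).reverse).drop m =
      (PySem.List.pyRange ((xs.length : Int) - 1 - m) (-1) (-1)).map
        (fun i => (i, PySem.List.pyGetD xs i "")) := by
  rw [PySem.List.pyRange_neg_one]
  apply List.ext_getElem
  · simp only [List.length_drop, List.length_reverse, PySem.List.length_enumerate,
      List.length_map, List.length_range]
    omega
  · intro k h1 h2
    simp only [List.length_drop, List.length_reverse, PySem.List.length_enumerate] at h1
    simp only [List.getElem_drop, List.getElem_reverse, PySem.List.length_enumerate,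
      List.getElem_map, List.getElem_range]
    rw [PySem.List.getElem_enumerate xs 0 (xs.length - 1 - (m + k)) (by simp [PySem.List.length_enumerate]; omega)]
    have hidx : (xs.length : Int) - 1 - m - (k : Int) = ((xs.length - 1 - (m + k) : Nat) : Int) := by
      omega
    rw [hidx, PySem.List.pyGetD_natCast, List.getD_eq_getElem xs "" (by omega)]
    simp

lemma lines_eq_zero (xs : List String) :
    ((PySem.List.enumerate xs).reverse).drop 0 =
      (PySem.List.pyRange ((xs.length : Int) - 1 - 0) (-1) (-1)).map
        (fun i => (i, PySem.List.pyGetD xs i "")) := by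
  simpa using lines_eq xs 0

lemma lines_eq_one (xs : List String) :
    ((PySem.List.enumerate xs).reverse).drop 1 =
      (PySem.List.pyRange ((xs.length : Int) - 1 - 1) (-1) (-1)).map
        (fun i => (i, PySem.List.pyGetD xs i "")) := by
  simpa using lines_eq xs 1

-- ===== VERDICT (by name: the statement is the Claim_ definition above) =====
theorem seek_end_of_dict_spec : Claim_equal_seek_end_of_dict := by
  intro module_data start_line start_col next_node_line next_node_col _ _
  unfold Spec_seek_end_of_dict seek_end_of_dict seek_end_of_dict_alt
  cases next_node_line with
  | none =>
    simp only [reduceIte]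
    rw [PySem.List.slice_from _ (by omega : (0:Int) ≤ 0)]
    rw [show ((0:Int)).toNat = 0 from rfl, lines_eq_zero, loop_eq]
    simp
  | some nl =>
    simp only []
    by_cases h : next_node_col = 0
    · rw [if_pos h, if_neg (by simp [h])]
      rw [PySem.List.slice_from _ (by omega : (0:Int) ≤ 1)]
      rw [show ((1:Int)).toNat = 1 from rfl, lines_eq_one, loop_eq]
    · rw [if_neg h, if_pos h]
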